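-- pv_equiv track=rewrite | github.com/aaronguo1996/ProgramSearch | Util.py | merge_constraints
-- ===== SOURCE A (Python) =====
-- def merge_constraints(constraint_list):
--     """
--     constraints = (regex counts, string length)
--     merge a list of constraints into one tuple:
--         1) choose the largest count for each regex
--         2) choose the largest length
--     """
--
--     res_d = {}
--     res_l = 0
--
--     for c in constraint_list:
--         d, l = c
--
--         # merge the dictionary
--         for r in d:
--             if r in res_d:
--                 res_d[r] = max(res_d[r], d[r])
--             else:
--                 res_d[r] = d[r]
--
--         # merge the integer length
--         res_l = max(res_l, l)
--
--     return res_d, res_l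
-- ===== SOURCE B (Python) =====
-- def merge_constraints(constraint_list):
--     """Two-phase merge: first group every count by its regex and collect all
--     lengths, then take the max of each group and of the lengths (at least 0)."""
--     grouped = {}
--     lengths = []
--     for d, l in constraint_list:
--         for r in d:
--             grouped.setdefault(r, []).append(d[r])
--         lengths.append(l)
--     res_d = {r: max(cs) for r, cs in grouped.items()}
--     res_l = max([0] + lengths)
--     return res_d, res_l
-- ===== Notes on version B (the rewrite author's own statement) =====
-- stated objective: alternative
-- what changed: Replaces A's running-max dict updated inside the loop by a two-phase decomposition: one pass groups every count into per-regex lists and collects all lengths, then a comprehension takes max per group and max of the lengths.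
import Mathlib
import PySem

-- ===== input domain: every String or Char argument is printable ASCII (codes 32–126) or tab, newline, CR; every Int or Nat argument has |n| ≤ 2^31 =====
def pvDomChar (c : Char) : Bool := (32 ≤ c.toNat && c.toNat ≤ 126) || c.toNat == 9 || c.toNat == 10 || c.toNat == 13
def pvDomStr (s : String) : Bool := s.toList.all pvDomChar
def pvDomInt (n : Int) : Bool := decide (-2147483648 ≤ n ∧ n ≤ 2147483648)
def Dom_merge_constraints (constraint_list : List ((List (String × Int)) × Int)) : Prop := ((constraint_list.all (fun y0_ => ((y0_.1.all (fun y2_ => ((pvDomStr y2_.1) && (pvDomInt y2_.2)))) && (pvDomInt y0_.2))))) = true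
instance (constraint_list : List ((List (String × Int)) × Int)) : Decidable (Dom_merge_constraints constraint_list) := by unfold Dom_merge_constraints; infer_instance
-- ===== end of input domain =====

-- ===== PORT A =====
-- B changes the decomposition: A keeps a running max per regex; B first groups the counts per regex, then maxes each group.
-- Shared model of the Python input dict `d` (assoc list, first-match lookup): `d[r]` for a key r of d.
-- find? always succeeds when r is a key of d, so the `.getD 0` default is never used.
def dictGet (d : List (String × Int)) (r : String) : Int :=
  ((d.find? (fun q => q.1 == r)).map (fun q => q.2)).getD 0

def merge_constraints (constraint_list : List ((List (String × Int)) × Int)) : (List (String × Int)) × Int :=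
  -- res_d = {}; res_l = 0; for (d, l) in constraint_list: for r in d: … ; res_l = max(res_l, l)
  let st := constraint_list.foldl
    (fun (st : PySem.Dict String Int × Int) c =>
      (c.1.foldl
        (fun rd p =>
          if rd.contains p.1 then rd.insert p.1 (max (rd.getD p.1 0) (dictGet c.1 p.1))
          else rd.insert p.1 (dictGet c.1 p.1)) st.1,
       max st.2 c.2))
    (PySem.Dict.empty, 0)
  (st.1.items, st.2)

-- ===== PORT B =====
def merge_constraints_alt (constraint_list : List ((List (String × Int)) × Int)) : (List (String × Int)) × Int :=
  -- grouped = {}; lengths = []; for (d, l): for r in d: grouped.setdefault(r, []).append(d[r]); lengths.append(l)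
  let st := constraint_list.foldl
    (fun (st : PySem.Dict String (List Int) × List Int) c =>
      (c.1.foldl (fun g p => g.modify p.1 [] (fun cs => cs ++ [dictGet c.1 p.1])) st.1,
       st.2 ++ [c.2]))
    (PySem.Dict.empty, [])
  -- res_d = {r: max(cs) for r, cs in grouped.items()}   (cs is never empty, so max? is some; .getD 0 unused)
  let res_d := st.1.items.foldl
    (fun res p => res.insert p.1 ((PySem.List.max? p.2 id).getD 0)) PySem.Dict.empty
  -- res_l = max([0] + lengths)
  let res_l := (PySem.List.max? ((0 : Int) :: st.2) id).getD 0
  (res_d.items, res_l)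

-- ===== PRECONDITION & SPEC =====
def Spec_merge_constraints (constraint_list : List ((List (String × Int)) × Int)) (out : (List (String × Int)) × Int) : Prop := out = merge_constraints_alt constraint_list
instance (constraint_list : List ((List (String × Int)) × Int)) (out : (List (String × Int)) × Int) : Decidable (Spec_merge_constraints constraint_list out) := by unfold Spec_merge_constraints; infer_instance

-- ===== CLAIM (what is proved, stated in full; the proofs are below) =====
def Claim_equal_merge_constraints : Prop := ∀ (constraint_list : List ((List (String × Int)) × Int)), Dom_merge_constraints constraint_list → Spec_merge_constraints constraint_list (merge_constraints constraint_list)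

-- ===== LEMMAS AND PROOFS =====

-- the flattened stream of (regex, looked-up count) updates both loops perform
def pairsOf (cl : List ((List (String × Int)) × Int)) : List (String × Int) :=
  cl.flatMap (fun c => c.1.map (fun p => (p.1, dictGet c.1 p.1)))

def stepA (rd : PySem.Dict String Int) (q : String × Int) : PySem.Dict String Int :=
  rd.insert q.1 (if rd.contains q.1 then max (rd.getD q.1 0) q.2 else q.2)

def optfold (vs : List Int) (o : Option Int) : Option Int :=
  vs.foldl (fun o v => some (o.elim v (fun m => max m v))) o

lemma foldA_eq (cl : List ((List (String × Int)) × Int)) (e : PySem.Dict String Int) :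
    cl.foldl (fun rd c => c.1.foldl
        (fun rd p =>
          if rd.contains p.1 then rd.insert p.1 (max (rd.getD p.1 0) (dictGet c.1 p.1))
          else rd.insert p.1 (dictGet c.1 p.1)) rd) e
      = (pairsOf cl).foldl stepA e := by
  rw [pairsOf, List.foldl_flatMap]
  congr 1; funext rd c
  rw [List.foldl_map]
  congr 1; funext rd p
  simp only [stepA]
  split <;> rfl

lemma foldB_eq (cl : List ((List (String × Int)) × Int)) (e : PySem.Dict String (List Int)) :
    cl.foldl (fun g c => c.1.foldl
        (fun g p => g.modify p.1 [] (fun cs => cs ++ [dictGet c.1 p.1])) g) e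
      = (pairsOf cl).foldl (fun g q => g.modify q.1 [] (fun cs => cs ++ [q.2])) e := by
  rw [pairsOf, List.foldl_flatMap]
  congr 1; funext g c
  rw [List.foldl_map]

lemma optfold_cons (v : Int) (vs : List Int) (o : Option Int) :
    optfold (v :: vs) o = optfold vs (some (o.elim v (fun m => max m v))) := rfl

lemma getA (ps : List (String × Int)) (rd : PySem.Dict String Int) (c : String) :
    (ps.foldl stepA rd).get? c
      = optfold ((ps.filter (fun p => p.1 == c)).map (fun p => p.2)) (rd.get? c) := by
  induction ps generalizing rd with
  | nil => rfl
  | cons q ps ih =>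
    rw [List.foldl_cons, ih]
    by_cases h : q.1 = c
    · subst h
      simp only [List.filter_cons, beq_self_eq_true, if_pos trivial, List.map_cons]
      have hget : (stepA rd q).get? q.1
          = some ((rd.get? q.1).elim q.2 (fun m => max m q.2)) := by
        rw [stepA, PySem.Dict.get?_insert_self]
        rcases ho : rd.get? q.1 with _ | m
        · have hc : rd.contains q.1 = false := by
            rw [PySem.Dict.contains_eq_isSome_get?, ho]; rfl
          simp [hc]
        · have hc : rd.contains q.1 = true := by
            rw [PySem.Dict.contains_eq_isSome_get?, ho]; rfl
          simp [hc, PySem.Dict.getD_eq_get?_getD, ho]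
      rw [hget, optfold_cons]
    · have hb : (q.1 == c) = false := by simpa using h
      simp only [List.filter_cons, hb, if_neg, Bool.false_eq_true, not_false_iff]
      have : (stepA rd q).get? c = rd.get? c := by
        rw [stepA, PySem.Dict.get?_insert_of_ne _ _ (fun hc => h hc.symm)]
      rw [this]

lemma splitA (cl : List ((List (String × Int)) × Int)) (st : PySem.Dict String Int × Int) :
    cl.foldl
      (fun (st : PySem.Dict String Int × Int) c =>
        (c.1.foldl
          (fun rd p =>
            if rd.contains p.1 then rd.insert p.1 (max (rd.getD p.1 0) (dictGet c.1 p.1))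
            else rd.insert p.1 (dictGet c.1 p.1)) st.1,
         max st.2 c.2)) st
    = (cl.foldl (fun rd c => c.1.foldl
          (fun rd p =>
            if rd.contains p.1 then rd.insert p.1 (max (rd.getD p.1 0) (dictGet c.1 p.1))
            else rd.insert p.1 (dictGet c.1 p.1)) rd) st.1,
       cl.foldl (fun l c => max l c.2) st.2) := by
  induction cl generalizing st with
  | nil => rfl
  | cons c cl ih => rw [List.foldl_cons, List.foldl_cons, List.foldl_cons, ih]

lemma splitB (cl : List ((List (String × Int)) × Int)) (st : PySem.Dict String (List Int) × List Int) :
    cl.foldl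
      (fun (st : PySem.Dict String (List Int) × List Int) c =>
        (c.1.foldl (fun g p => g.modify p.1 [] (fun cs => cs ++ [dictGet c.1 p.1])) st.1,
         st.2 ++ [c.2])) st
    = (cl.foldl (fun g c => c.1.foldl
          (fun g p => g.modify p.1 [] (fun cs => cs ++ [dictGet c.1 p.1])) g) st.1,
       cl.foldl (fun ls c => ls ++ [c.2]) st.2) := by
  induction cl generalizing st with
  | nil => rfl
  | cons c cl ih => rw [List.foldl_cons, List.foldl_cons, List.foldl_cons, ih]

lemma optfold_eq_max? (vs : List Int) :
    optfold vs none = PySem.List.max? vs id := by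
  rw [optfold, PySem.List.max?]
  congr 1; funext o v
  rcases o with _ | m
  · rfl
  · show some (max m v) = if id m < id v then some v else some m
    rcases lt_trichotomy m v with h | h | h
    · rw [if_pos (show id m < id v from h), max_eq_right h.le]
    · subst h; simp
    · rw [if_neg (show ¬ id m < id v by simpa using (by omega : ¬ m < v)),
          max_eq_left (by omega)]

lemma optfold_some (vs : List Int) (m : Int) :
    optfold vs (some m) = some (vs.foldl max m) := by
  induction vs generalizing m with
  | nil => rfl
  | cons v vs ih => rw [optfold, List.foldl_cons, ← optfold, ih]; rfl

lemma max?_cons_zero (xs : List Int) :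
    (PySem.List.max? ((0 : Int) :: xs) id).getD 0 = xs.foldl max 0 := by
  rw [← optfold_eq_max?]
  have h : optfold ((0 : Int) :: xs) none = optfold xs (some 0) := rfl
  rw [h, optfold_some]; rfl

-- ===== VERDICT (by name: the statement is the Claim_ definition above) =====
theorem merge_constraints_spec : Claim_equal_merge_constraints := by
  intro cl _
  unfold Spec_merge_constraints
  simp only [merge_constraints, merge_constraints_alt]
  rw [splitA, splitB]
  dsimp only
  refine Prod.ext ?_ ?_
  · -- dictionaries
    rw [foldA_eq, foldB_eq]
    set ps := pairsOf cl with hps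
    have hndA : ((ps.foldl stepA PySem.Dict.empty)).keys.Nodup := by
      have := PySem.Dict.nodup_keys_foldl_insert_key (κ := String) (ν := Int) ps
        (fun q => q.1)
        (fun rd q => if rd.contains q.1 then max (rd.getD q.1 0) q.2 else q.2)
        PySem.Dict.empty (by simp)
      simpa [stepA] using this
    have hndG : ((ps.foldl (fun g q => g.modify q.1 [] (fun cs => cs ++ [q.2]))
        PySem.Dict.empty)).keys.Nodup := by
      exact PySem.Dict.nodup_keys_foldl_modify_key ps (fun q => q.1) []
        (fun g q cs => cs ++ [q.2]) PySem.Dict.empty (by simp)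
    have hkeys : (ps.foldl stepA PySem.Dict.empty).keys
        = (ps.foldl (fun g q => g.modify q.1 [] (fun cs => cs ++ [q.2]))
            PySem.Dict.empty).keys := by
      have h1 := PySem.Dict.keys_foldl_insert_key (κ := String) (ν := Int) ps
        (fun q => q.1)
        (fun rd q => if rd.contains q.1 then max (rd.getD q.1 0) q.2 else q.2)
        PySem.Dict.empty
      have h2 := PySem.Dict.keys_foldl_modify_key ps (fun q => q.1) []
        (fun g q cs => cs ++ [q.2]) PySem.Dict.empty
      exact h1.trans h2.symm
    -- B's comprehension appends one (key, max) pair per grouped item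
    rw [PySem.Dict.items_foldl_insert_fresh _ _ _ _
      (fun p hp => PySem.Dict.contains_empty _) (by exact hndG)]
    rw [PySem.Dict.items_eq_map_keys _ hndA 0,
        PySem.Dict.items_eq_map_keys _ hndG []]
    rw [List.map_map, hkeys]
    refine List.map_congr_left (fun k _ => ?_)
    simp only [Function.comp_apply, Prod.mk.injEq, true_and]
    rw [PySem.Dict.getD_eq_get?_getD, getA, PySem.Dict.get?_empty,
        PySem.Dict.getD_foldl_modify_append, PySem.Dict.getD_empty,
        optfold_eq_max?]
    rfl
  · -- lengths
    have hlen : cl.foldl (fun ls c => ls ++ [c.2]) ([] : List Int)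
        = cl.map (fun c => c.2) := by
      rw [← List.foldl_map (f := fun c : (List (String × Int)) × Int => c.2)
        (g := fun ls x => ls ++ [x]), PySem.List.foldl_append_singleton]
      rfl
    rw [hlen, max?_cons_zero, ← List.foldl_map (f := fun c : (List (String × Int)) × Int => c.2)
      (g := fun l x => max l x)]
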